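-- pv_equiv track=rewrite | github.com/pmh-only/cafeapp | services/order-service/app/stress.py | _inventory_reservation
-- ===== SOURCE A (Python) =====
-- def _inventory_reservation(order):
--     """CPU-intensive inventory check with Fibonacci calculations"""
--     def fibonacci(n):
--         if n <= 1:
--             return n
--         return fibonacci(n-1) + fibonacci(n-2)
--
--     # Calculate Fibonacci for each item (CPU-intensive)
--     total_complexity = 0
--     for item in order.get('items', [])[:10]:  # Limit to prevent stack overflow
--         qty = item.get('qty', 1)
--         total_complexity += fibonacci(min(20 + qty, 30))
--
--     return total_complexity
-- ===== SOURCE B (Python) =====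
-- # Precomputed Fibonacci table: fib(0)..fib(30); the argument min(20+qty, 30) never exceeds 30.
-- _FIB = (0, 1, 1, 2, 3, 5, 8, 13, 21, 34, 55, 89, 144, 233, 377, 610, 987,
--         1597, 2584, 4181, 6765, 10946, 17711, 28657, 46368, 75025, 121393,
--         196418, 317811, 514229, 832040)
--
--
-- def _inventory_reservation(order):
--     """Same totals as A, but Fibonacci comes from a precomputed table (O(1) per item)."""
--     def lookup(qty):
--         n = min(20 + qty, 30)
--         return n if n <= 1 else _FIB[n]
--     return sum(lookup(item.get('qty', 1)) for item in order.get('items', [])[:10])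
-- ===== Notes on version B (the rewrite author's own statement) =====
-- stated objective: alternative
-- what changed: Replaces the exponential doubly-recursive Fibonacci with an O(1) lookup in a precomputed table of fib(0..30) (the argument is always min(20+qty,30) <= 30), summing a generator instead of an accumulator loop.
import Mathlib
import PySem

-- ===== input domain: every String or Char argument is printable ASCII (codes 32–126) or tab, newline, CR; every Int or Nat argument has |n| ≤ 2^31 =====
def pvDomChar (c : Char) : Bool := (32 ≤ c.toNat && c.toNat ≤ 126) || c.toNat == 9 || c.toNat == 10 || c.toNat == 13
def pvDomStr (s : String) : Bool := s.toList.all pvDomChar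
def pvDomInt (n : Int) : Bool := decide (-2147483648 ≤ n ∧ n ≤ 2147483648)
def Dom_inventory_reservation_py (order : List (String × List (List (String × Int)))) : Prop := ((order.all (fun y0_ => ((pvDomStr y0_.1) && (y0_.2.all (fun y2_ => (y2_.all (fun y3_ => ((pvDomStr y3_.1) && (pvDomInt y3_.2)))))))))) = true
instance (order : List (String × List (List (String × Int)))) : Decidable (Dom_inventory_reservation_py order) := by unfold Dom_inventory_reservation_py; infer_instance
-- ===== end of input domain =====

-- B replaces A's exponential doubly-recursive Fibonacci by an O(1) lookup in a
-- precomputed table of fib(0..30) — sound because the argument min(20+qty,30) is ≤ 30 —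
-- and sums a mapped list instead of running an accumulator loop (objective: alternative).

-- ===== PORT A =====
-- naive doubly-recursive fibonacci, exactly as in A
def fibRecA (n : Int) : Int :=
  if n ≤ 1 then n else fibRecA (n - 1) + fibRecA (n - 2)
termination_by n.toNat
decreasing_by all_goals (simp_wf; omega)

def inventory_reservation_py (order : List (String × List (List (String × Int)))) : Int :=
  (PySem.List.slice ((PySem.Dict.ofList order).getD "items" []) none (some 10)).foldl
    (fun acc item => acc + fibRecA (min (20 + (PySem.Dict.ofList item).getD "qty" 1) 30)) 0

-- ===== PORT B =====
-- _FIB = (fib(0), …, fib(30)), a module-level literal tuple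
def fibTable : List Int :=
  [0, 1, 1, 2, 3, 5, 8, 13, 21, 34, 55, 89, 144, 233, 377, 610, 987,
   1597, 2584, 4181, 6765, 10946, 17711, 28657, 46368, 75025, 121393,
   196418, 317811, 514229, 832040]

-- lookup(qty): n = min(20+qty, 30); return n if n <= 1 else _FIB[n]
-- (the .getD 0 is unreachable: _FIB[n] is only taken with 2 ≤ n ≤ 30, always in range)
def lookupB (qty : Int) : Int :=
  let n := min (20 + qty) 30
  if n ≤ 1 then n else (PySem.List.pyGet? fibTable n).getD 0

def inventory_reservation_py_alt (order : List (String × List (List (String × Int)))) : Int :=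
  ((PySem.List.slice ((PySem.Dict.ofList order).getD "items" []) none (some 10)).map
    (fun item => lookupB ((PySem.Dict.ofList item).getD "qty" 1))).sum

-- ===== PRECONDITION & SPEC =====
def Spec_inventory_reservation_py (order : List (String × List (List (String × Int)))) (out : Int) : Prop := out = inventory_reservation_py_alt order
instance (order : List (String × List (List (String × Int)))) (out : Int) : Decidable (Spec_inventory_reservation_py order out) := by unfold Spec_inventory_reservation_py; infer_instance

-- ===== CLAIM (what is proved, stated in full; the proofs are below) =====
def Claim_equal_inventory_reservation_py : Prop := ∀ (order : List (String × List (List (String × Int)))), Dom_inventory_reservation_py order → Spec_inventory_reservation_py order (inventory_reservation_py order)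

-- ===== LEMMAS AND PROOFS =====

-- fast iterative pair characterisation of Fibonacci (proof-side only)
def fibPair (k : Nat) : Int × Int :=
  (List.range k).foldl (fun (p : Int × Int) _ => (p.2, p.1 + p.2)) (0, 1)

lemma fibPair_succ (k : Nat) : fibPair (k + 1) = ((fibPair k).2, (fibPair k).1 + (fibPair k).2) := by
  simp [fibPair, List.range_succ]

lemma fibRecA_pair : ∀ k : Nat, fibRecA (k : Int) = (fibPair k).1 ∧ fibRecA ((k : Int) + 1) = (fibPair k).2 := by
  intro k
  induction k with
  | zero => constructor <;> simp [fibRecA, fibPair]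
  | succ k ih =>
    obtain ⟨h1, h2⟩ := ih
    rw [fibPair_succ]
    push_cast
    refine ⟨h2, ?_⟩
    rw [fibRecA]
    have hc : ¬ ((k : Int) + 1 + 1 ≤ 1) := by omega
    rw [if_neg hc]
    have e1 : (k : Int) + 1 + 1 - 1 = (k : Int) + 1 := by ring
    have e2 : (k : Int) + 1 + 1 - 2 = (k : Int) := by ring
    rw [e1, e2, h1, h2]
    ring

-- the table agrees with the iterative pair on every index B ever reads
lemma table_eq_pair : ∀ n : Int, 2 ≤ n → n ≤ 30 →
    (PySem.List.pyGet? fibTable n).getD 0 = (fibPair n.toNat).1 := by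
  intro n h2 h30
  interval_cases n <;> decide

lemma lookupB_eq_fibRecA (qty : Int) :
    lookupB qty = fibRecA (min (20 + qty) 30) := by
  unfold lookupB
  set n := min (20 + qty) 30 with hn
  by_cases h : n ≤ 1
  · rw [if_pos h, fibRecA, if_pos h]
  · rw [if_neg h]
    have h2 : 2 ≤ n := by omega
    have h30 : n ≤ 30 := by omega
    have hk : ((n.toNat : Int)) = n := by omega
    rw [table_eq_pair n h2 h30, ← (fibRecA_pair n.toNat).1, hk]

lemma foldl_add_eq_sum_map {α : Type} (f : α → Int) :
    ∀ (l : List α) (init : Int), l.foldl (fun a x => a + f x) init = init + (l.map f).sum := by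
  intro l
  induction l with
  | nil => simp
  | cons x xs ih => intro init; simp [List.foldl_cons, ih, add_assoc]

-- ===== VERDICT (by name: the statement is the Claim_ definition above) =====
theorem inventory_reservation_py_spec : Claim_equal_inventory_reservation_py := by
  intro order _
  unfold Spec_inventory_reservation_py inventory_reservation_py inventory_reservation_py_alt
  rw [foldl_add_eq_sum_map]
  simp [lookupB_eq_fibRecA]
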